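-- pv_equiv track=rewrite | github.com/3amberloaf/Practice-Problems | arrays/fruit_answer.py | getMinimumFruits
-- ===== SOURCE A (Python) =====
-- def getMinimumFruits(fruits):
--
--     # Count the fruit
--     fruit_counts = {} # Initialize an empty dictionary
--     for fruit in fruits: # Iterate through dictionary, variable 'fruit' takes on the value of each item as the loop iterates
--         if fruit in fruit_counts:
--             fruit_counts[fruit] += 1
--         else:
--             fruit_counts[fruit] = 1
--
--     even_count_fruits = sum(1 for count in fruit_counts.values() if count % 2 == 0)
--     """ sums the fruit counts who have an even modulo"""
--
--     min_fruits_left = max(1, even_count_fruits) if even_count_fruits > 0 else 0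
--
--     return min_fruits_left
-- ===== SOURCE B (Python) =====
-- def getMinimumFruits(fruits):
--     s = sorted(fruits)
--     total = 0
--     run = 0
--     for i, f in enumerate(s):
--         run += 1
--         if i + 1 == len(s) or s[i + 1] != f:
--             if run % 2 == 0:
--                 total += 1
--             run = 0
--     return total
-- ===== Notes on version B (the rewrite author's own statement) =====
-- stated objective: alternative
-- what changed: B sorts a copy of the list and counts even-length maximal runs of equal adjacent elements in one pass, instead of building a hash-table of counts and summing over its values (the max/if wrapper disappears).
import Mathlib
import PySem

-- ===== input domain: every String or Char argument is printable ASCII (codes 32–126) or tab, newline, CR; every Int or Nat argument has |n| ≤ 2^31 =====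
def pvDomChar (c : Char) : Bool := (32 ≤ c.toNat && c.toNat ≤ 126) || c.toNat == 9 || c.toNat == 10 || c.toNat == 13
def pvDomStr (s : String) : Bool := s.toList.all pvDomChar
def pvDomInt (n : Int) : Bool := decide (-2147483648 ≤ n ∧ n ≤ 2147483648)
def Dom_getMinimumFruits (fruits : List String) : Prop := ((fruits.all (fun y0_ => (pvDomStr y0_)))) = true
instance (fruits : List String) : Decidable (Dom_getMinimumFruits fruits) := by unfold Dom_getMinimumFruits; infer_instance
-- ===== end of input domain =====

-- B sorts a copy and counts even-length maximal runs in one pass, instead of A's count-dictionary plus a sum over its values; alternative decomposition, same return value.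


-- ===== PORT A =====
def getMinimumFruits (fruits : List String) : Int :=
  let fruit_counts : PySem.Dict String Int :=
    fruits.foldl (fun d fruit =>
      if d.contains fruit then d.modify fruit 0 (· + 1)
      else d.insert fruit 1) PySem.Dict.empty
  let even_count_fruits : Int :=
    (fruit_counts.values.map (fun count => if PySem.Int.mod count 2 = 0 then (1 : Int) else 0)).sum
  if even_count_fruits > 0 then max 1 even_count_fruits else 0

-- ===== PORT B =====
-- one pass over the sorted list; `run` is the length so far of the current run of equal
-- adjacent elements; a run is flushed when the next element differs (or the list ends)
def pvRunLoop : List String → Int → Int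
  | [], _ => 0
  | [_], run => if PySem.Int.mod (run + 1) 2 = 0 then 1 else 0
  | f :: g :: t, run =>
    if f == g then pvRunLoop (g :: t) (run + 1)
    else (if PySem.Int.mod (run + 1) 2 = 0 then 1 else 0) + pvRunLoop (g :: t) 0

def getMinimumFruits_alt (fruits : List String) : Int :=
  pvRunLoop (PySem.List.sorted fruits (fun x => x) false) 0

-- ===== PRECONDITION & SPEC =====
def Spec_getMinimumFruits (fruits : List String) (out : Int) : Prop := out = getMinimumFruits_alt fruits
instance (fruits : List String) (out : Int) : Decidable (Spec_getMinimumFruits fruits out) := by unfold Spec_getMinimumFruits; infer_instance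

-- ===== CLAIM (what is proved, stated in full; the proofs are below) =====
def Claim_equal_getMinimumFruits : Prop := ∀ (fruits : List String), Dom_getMinimumFruits fruits → Spec_getMinimumFruits fruits (getMinimumFruits fruits)

-- ===== LEMMAS AND PROOFS =====

-- the common value: the number of distinct elements with an even number of occurrences
def pvEvens (l : List String) : Nat :=
  (PySem.Set.ofList l).countP (fun k => l.count k % 2 == 0)

-- A's counting loop is collections.Counter
lemma loopA_eq_counter (fruits : List String) :
    fruits.foldl (fun d fruit =>
      if d.contains fruit then d.modify fruit 0 (· + 1)
      else d.insert fruit 1) PySem.Dict.empty = PySem.Dict.counter fruits := by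
  have hstep : (fun (d : PySem.Dict String Int) fruit =>
      if d.contains fruit then d.modify fruit 0 (· + 1) else d.insert fruit 1)
      = (fun d fruit => d.insert fruit (d.getD fruit 0 + 1)) := by
    funext d x
    by_cases h : d.contains x = true
    · simp [h, PySem.Dict.modify]
    · simp only [Bool.not_eq_true] at h
      simp [h, PySem.Dict.getD_of_not_contains d 0 h]
  rw [hstep, PySem.Dict.foldl_insert_getD_add_one_eq_counter]

-- A's generator-sum over the counter's values is pvEvens
lemma A_evens_sum (fruits : List String) :
    ((PySem.Dict.counter fruits).values.map
      (fun count => if PySem.Int.mod count 2 = 0 then (1 : Int) else 0)).sum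
    = (pvEvens fruits : Int) := by
  unfold pvEvens
  rw [PySem.Dict.values_eq_map_keys _ (PySem.Dict.nodup_keys_counter fruits) 0,
      PySem.Dict.keys_counter]
  simp only [PySem.Dict.getD_counter, List.map_map]
  have h1 : ((PySem.Set.ofList fruits).map
      (fun k => if PySem.Int.mod ((fruits.count k : Int)) 2 = 0 then (1:Int) else 0)).sum
      = ((PySem.Set.ofList fruits).countP (fun k => PySem.Int.mod ((fruits.count k : Int)) 2 = 0) : Int) := by
    have := PySem.List.sum_map_ite_one_zero
      (fun k => decide (PySem.Int.mod ((fruits.count k : Int)) 2 = 0)) (PySem.Set.ofList fruits)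
    simpa using this
  rw [show ((fun count => if PySem.Int.mod count 2 = 0 then (1:Int) else 0) ∘ fun k => ((fruits.count k : Int)))
      = fun k => if PySem.Int.mod ((fruits.count k : Int)) 2 = 0 then (1:Int) else 0 from rfl, h1]
  congr 1
  apply List.countP_congr
  intro k _
  simp
  omega

lemma A_eq_evens (fruits : List String) : getMinimumFruits fruits = (pvEvens fruits : Int) := by
  simp only [getMinimumFruits]
  rw [loopA_eq_counter, A_evens_sum]
  split_ifs <;> omega

-- B's run loop on a (sorted) cons: flush the head's whole run, then continue on the rest
lemma runLoop_cons : ∀ (l : List String) (x : String) (run : Int),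
    (x :: l).Pairwise (· ≤ ·) →
    pvRunLoop (x :: l) run =
      (if PySem.Int.mod (run + 1 + l.count x) 2 = 0 then 1 else 0) +
        pvRunLoop (l.filter (fun y => y ≠ x)) 0
  | [], x, run, _ => by simp [pvRunLoop]
  | y :: t, x, run, hp => by
    by_cases hxy : x = y
    · subst hxy
      have ht : (x :: t).Pairwise (· ≤ ·) := hp.of_cons
      have ih := runLoop_cons t x (run + 1) ht
      simp only [pvRunLoop, BEq.rfl, if_true, List.count_cons_self, List.filter_cons,
        decide_eq_true_eq] at *
      rw [ih]
      simp only [ne_eq, not_true_eq_false, if_false]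
      have harg : (run + 1 + 1 : Int) + (t.count x : Int) = run + 1 + ((t.count x + 1 : Nat) : Int) := by
        push_cast; ring
      rw [harg]
    · have hxy' : ¬ (x == y) = true := by simpa using hxy
      have hxley : x ≤ y := hp.rel_head (by simp)
      have hlt : x < y := lt_of_le_of_ne hxley hxy
      have hall : ∀ z ∈ y :: t, x < z := by
        intro z hz
        rcases List.mem_cons.mp hz with rfl | hz
        · exact hlt
        · exact lt_of_lt_of_le hlt (List.rel_of_pairwise_cons hp.of_cons hz)
      have hcount : (y :: t).count x = 0 := by
        rw [List.count_eq_zero]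
        intro hmem
        exact absurd rfl (ne_of_gt (hall x hmem))
      have hfilt : (y :: t).filter (fun z => z ≠ x) = y :: t := by
        apply List.filter_eq_self.mpr
        intro z hz
        simp [ne_of_gt (hall z hz)]
      rw [hfilt, hcount]
      simp [pvRunLoop, hxy']

-- on a sorted list the run loop computes pvEvens
lemma runLoop_sorted : ∀ (n : Nat) (l : List String), l.length ≤ n → l.Pairwise (· ≤ ·) →
    pvRunLoop l 0 = (pvEvens l : Int)
  | _, [], _, _ => by simp [pvRunLoop, pvEvens]
  | 0, x :: t, h, _ => by simp at h
  | n + 1, x :: t, hlen, hp => by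
    rw [runLoop_cons t x 0 hp]
    have hlen' : (t.filter (fun y => y ≠ x)).length ≤ n := by
      have := List.length_filter_le (fun y => y ≠ x) t
      simp at hlen; omega
    have hpf : (t.filter (fun y => y ≠ x)).Pairwise (· ≤ ·) := hp.of_cons.filter _
    rw [runLoop_sorted n _ hlen' hpf]
    have key : pvEvens (x :: t) =
        (if (1 + t.count x) % 2 = 0 then 1 else 0) + pvEvens (t.filter (fun y => y ≠ x)) := by
      unfold pvEvens
      rw [PySem.Set.ofList_cons]
      rw [List.countP_cons]
      have hmemperm : (PySem.Set.ofList (t.filter (fun y => y ≠ x))).Perm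
          ((PySem.Set.ofList t).discard x) := by
        rw [List.perm_ext_iff_of_nodup (PySem.Set.nodup_ofList _)
          (PySem.Set.nodup_discard _ x (PySem.Set.nodup_ofList t))]
        intro a
        rw [PySem.Set.mem_ofList, PySem.Set.mem_discard, PySem.Set.mem_ofList, List.mem_filter]
        simp
      have hcntP : ((PySem.Set.ofList t).discard x).countP (fun k => (x :: t).count k % 2 == 0)
          = (PySem.Set.ofList (t.filter (fun y => y ≠ x))).countP
              (fun k => (t.filter (fun y => y ≠ x)).count k % 2 == 0) := by
        rw [← hmemperm.countP_eq]
        apply List.countP_congr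
        intro k hk
        have hkt : k ∈ t.filter (fun y => y ≠ x) := (PySem.Set.mem_ofList _ _).mp hk
        have hkx : k ≠ x := by
          have := (List.mem_filter.mp hkt).2
          simpa using this
        have hc1 : (x :: t).count k = t.count k := by
          have hxk : ¬ x = k := Ne.symm hkx
          rw [List.count_cons]; simp [hxk]
        have hc2 : (t.filter (fun y => y ≠ x)).count k = t.count k := by
          rw [List.count_filter]; simp [hkx]
        rw [hc1, hc2]
      rw [hcntP]
      simp only [List.count_cons_self]
      have hcomm : t.count x + 1 = 1 + t.count x := by omega
      rw [hcomm]
      simp [Nat.add_comm]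
    rw [key]
    have hmod : PySem.Int.mod (0 + 1 + (t.count x : Int)) 2 = (((1 + t.count x) % 2 : Nat) : Int) := by
      have h2 := PySem.Int.mod_natCast (1 + t.count x) 2
      rw [← h2]; congr 1
    simp only [hmod]
    by_cases h : (1 + t.count x) % 2 = 0
    · simp [h]
    · have h1 : (1 + t.count x) % 2 = 1 := by omega
      simp [h1]

lemma B_eq_evens (fruits : List String) : getMinimumFruits_alt fruits = (pvEvens fruits : Int) := by
  unfold getMinimumFruits_alt
  have hp : (PySem.List.sorted fruits (fun x => x) false).Pairwise (· ≤ ·) := by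
    simpa using PySem.List.sorted_pairwise fruits (fun x => x)
  rw [runLoop_sorted (PySem.List.sorted fruits (fun x => x) false).length _ le_rfl hp]
  congr 1
  unfold pvEvens
  have hperm : (PySem.List.sorted fruits (fun x => x) false).Perm fruits :=
    PySem.List.sorted_perm fruits (fun x => x) false
  have hset : (PySem.Set.ofList (PySem.List.sorted fruits (fun x => x) false)).Perm
      (PySem.Set.ofList fruits) := by
    rw [List.perm_ext_iff_of_nodup (PySem.Set.nodup_ofList _) (PySem.Set.nodup_ofList _)]
    intro a
    rw [PySem.Set.mem_ofList, PySem.Set.mem_ofList]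
    exact hperm.mem_iff
  rw [show (fun k => (PySem.List.sorted fruits (fun x => x) false).count k % 2 == 0)
      = fun k => fruits.count k % 2 == 0 from funext fun k => by rw [hperm.count_eq]]
  exact hset.countP_eq _

-- ===== VERDICT (by name: the statement is the Claim_ definition above) =====
theorem getMinimumFruits_spec : Claim_equal_getMinimumFruits := by
  intro fruits _
  unfold Spec_getMinimumFruits
  rw [A_eq_evens, B_eq_evens]
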